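-- pv_equiv track=rewrite | github.com/fraware/LabTrust-Gym | src/labtrust_gym/baselines/coordination/ripple_effect.py | _build_neighbor_graph
-- ===== SOURCE A (Python) =====
-- def _build_neighbor_graph(
--     agents: list[str],
--     agent_zone: dict[str, str],
--     zone_adjacency: set[tuple[str, str]],
-- ) -> dict[str, list[str]]:
--     """
--     Neighbor graph: agent j's neighbors = agents in same zone or in adjacent zones.
--     Deterministic: sorted order.
--     """
--     zone_neighbors: dict[str, set[str]] = {}
--     for (a, b) in zone_adjacency:
--         zone_neighbors.setdefault(a, set()).add(b)
--         zone_neighbors.setdefault(b, set()).add(a)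
--     out: dict[str, list[str]] = {}
--     for j in agents:
--         z_j = agent_zone.get(j) or ""
--         allowed_zones = {z_j} | zone_neighbors.get(z_j, set())
--         neighbors = [a for a in agents if a != j and (agent_zone.get(a) or "") in allowed_zones]
--         out[j] = sorted(neighbors)
--     return out
-- ===== SOURCE B (Python) =====
-- def _build_neighbor_graph(
--     agents: list[str],
--     agent_zone: dict[str, str],
--     zone_adjacency: set[tuple[str, str]],
-- ) -> dict[str, list[str]]:
--     # Zone adjacency as a dict of sets (symmetric).
--     adj: dict[str, set[str]] = {}
--     for (a, b) in zone_adjacency: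
--         adj.setdefault(a, set()).add(b)
--         adj.setdefault(b, set()).add(a)
--     # Group agents by zone once.
--     by_zone: dict[str, list[str]] = {}
--     for a in agents:
--         by_zone.setdefault(agent_zone.get(a) or "", []).append(a)
--     # One sorted neighbor pool per zone (instead of one sort per agent).
--     pool: dict[str, list[str]] = {}
--     for z, members in by_zone.items():
--         gathered = list(members)
--         for zz in adj.get(z, set()):
--             if zz != z:
--                 gathered.extend(by_zone.get(zz, []))
--         pool[z] = sorted(gathered)
--     return {j: [x for x in pool[agent_zone.get(j) or ""] if x != j] for j in agents}
-- ===== Notes on version B (the rewrite author's own statement) =====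
-- stated objective: faster
-- what changed: B groups agents by zone once and builds one sorted neighbor pool per zone (sort-once-per-zone, then a per-agent self-filter of the shared pool), instead of A's per-agent scan of all agents followed by a per-agent sort.
import Mathlib
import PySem

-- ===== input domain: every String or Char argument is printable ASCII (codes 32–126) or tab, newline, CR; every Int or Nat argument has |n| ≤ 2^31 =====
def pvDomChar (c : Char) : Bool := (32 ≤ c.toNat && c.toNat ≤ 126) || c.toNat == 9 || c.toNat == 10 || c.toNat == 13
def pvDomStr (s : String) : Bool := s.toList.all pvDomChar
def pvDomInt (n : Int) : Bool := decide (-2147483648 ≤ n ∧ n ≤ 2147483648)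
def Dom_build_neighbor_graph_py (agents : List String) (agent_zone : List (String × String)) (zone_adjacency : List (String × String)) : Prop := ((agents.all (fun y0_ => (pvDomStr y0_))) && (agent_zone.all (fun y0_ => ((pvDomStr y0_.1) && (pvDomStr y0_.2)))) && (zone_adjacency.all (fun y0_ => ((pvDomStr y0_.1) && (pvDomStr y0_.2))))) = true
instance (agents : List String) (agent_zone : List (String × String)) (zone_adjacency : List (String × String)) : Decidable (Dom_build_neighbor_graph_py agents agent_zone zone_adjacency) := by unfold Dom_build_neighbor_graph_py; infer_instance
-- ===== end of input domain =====

-- B builds one sorted neighbor pool per ZONE (group agents by zone once, sort once per zone,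
-- per-agent only a self-filter of the shared pool) instead of A's per-agent scan + per-agent sort.

-- ===== PORT A =====
-- shared with B: the Python dict parameter agent_zone, and the symmetric zone-adjacency dict
-- (both Pythons build it with the identical two setdefault(...).add(...) lines).
def pvAz (agent_zone : List (String × String)) : PySem.Dict String String :=
  PySem.Dict.ofList agent_zone

def pvZoneAdj (zone_adjacency : List (String × String)) : PySem.Dict String (PySem.Set String) :=
  zone_adjacency.foldl
    (fun d ab =>
      (d.modify ab.1 PySem.Set.empty (fun s => s.add ab.2)).modify ab.2 PySem.Set.empty (fun s => s.add ab.1))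
    PySem.Dict.empty

-- 'agent_zone.get(x) or ""' = getD x "" exactly (the 'or' only replaces None or "" by "").
def build_neighbor_graph_py (agents : List String) (agent_zone : List (String × String)) (zone_adjacency : List (String × String)) : List (String × List String) :=
  let zone_neighbors := pvZoneAdj zone_adjacency
  (agents.foldl
    (fun out j =>
      let z_j := (pvAz agent_zone).getD j ""
      let allowed := PySem.Set.union (PySem.Set.ofList [z_j]) (zone_neighbors.getD z_j PySem.Set.empty)
      let neighbors := agents.filter (fun a => decide (a ≠ j) && allowed.contains ((pvAz agent_zone).getD a ""))
      out.insert j (PySem.List.sorted neighbors (fun x => x) false))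
    PySem.Dict.empty).items

-- ===== PORT B =====
-- by_zone: group agents by zone (setdefault(z, []).append(a) = modify z [] (· ++ [a]))
def pvByZone (agents : List String) (agent_zone : List (String × String)) : PySem.Dict String (List String) :=
  agents.foldl (fun d a => d.modify ((pvAz agent_zone).getD a "") [] (fun ms => ms ++ [a])) PySem.Dict.empty

-- gathered = list(members); for zz in adj.get(z, set()): if zz != z: gathered.extend(by_zone.get(zz, []))
def pvGather (agents : List String) (agent_zone : List (String × String)) (zone_adjacency : List (String × String)) (z : String) (ms : List String) : List String :=
  ((pvZoneAdj zone_adjacency).getD z PySem.Set.empty).foldl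
    (fun g zz => if zz ≠ z then g ++ (pvByZone agents agent_zone).getD zz [] else g) ms

def pvPool (agents : List String) (agent_zone : List (String × String)) (zone_adjacency : List (String × String)) : PySem.Dict String (List String) :=
  (pvByZone agents agent_zone).items.foldl
    (fun p zm => p.insert zm.1 (PySem.List.sorted (pvGather agents agent_zone zone_adjacency zm.1 zm.2) (fun x => x) false))
    PySem.Dict.empty

-- pool[z]: the key z = zone of j is always present (j was grouped under it), so getD is exact.
def build_neighbor_graph_py_alt (agents : List String) (agent_zone : List (String × String)) (zone_adjacency : List (String × String)) : List (String × List String) :=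
  (agents.foldl
    (fun out j =>
      out.insert j (((pvPool agents agent_zone zone_adjacency).getD ((pvAz agent_zone).getD j "") []).filter (fun x => decide (x ≠ j))))
    PySem.Dict.empty).items

-- ===== PRECONDITION & SPEC =====
def Spec_build_neighbor_graph_py (agents : List String) (agent_zone : List (String × String)) (zone_adjacency : List (String × String)) (out : List (String × List String)) : Prop := out = build_neighbor_graph_py_alt agents agent_zone zone_adjacency
instance (agents : List String) (agent_zone : List (String × String)) (zone_adjacency : List (String × String)) (out : List (String × List String)) : Decidable (Spec_build_neighbor_graph_py agents agent_zone zone_adjacency out) := by unfold Spec_build_neighbor_graph_py; infer_instance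

-- ===== CLAIM (what is proved, stated in full; the proofs are below) =====
def Claim_equal_build_neighbor_graph_py : Prop := ∀ (agents : List String) (agent_zone : List (String × String)) (zone_adjacency : List (String × String)), Dom_build_neighbor_graph_py agents agent_zone zone_adjacency → Spec_build_neighbor_graph_py agents agent_zone zone_adjacency (build_neighbor_graph_py agents agent_zone zone_adjacency)

-- ===== LEMMAS AND PROOFS =====

-- each zone's group in by_zone is the sublist of agents with that zone

lemma pvByZone_getD (agents : List String) (agent_zone : List (String × String)) (z : String) :
    (pvByZone agents agent_zone).getD z []
      = agents.filter (fun a => (pvAz agent_zone).getD a "" == z) := by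
  unfold pvByZone
  have h := PySem.Dict.getD_foldl_modify_append (l := agents.map (fun a => ((pvAz agent_zone).getD a "", a)))
    (d := (PySem.Dict.empty : PySem.Dict String (List String))) (c := z)
  rw [List.foldl_map] at h
  simp only [h, List.filter_map, Function.comp_def, List.map_map]
  simp [PySem.Dict.getD_empty]

lemma pvByZone_keys (agents : List String) (agent_zone : List (String × String)) :
    (pvByZone agents agent_zone).keys
      = PySem.Set.ofList (agents.map (fun a => (pvAz agent_zone).getD a "")) := by
  unfold pvByZone
  rw [PySem.Dict.keys_foldl_modify_key (l := agents) (key := fun a => (pvAz agent_zone).getD a "")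
    (d0 := []) (f := fun _ a => (fun ms => ms ++ [a])) (d := PySem.Dict.empty)]
  rw [PySem.Dict.keys_empty, PySem.Set.update_nil_left]

lemma pvByZone_keys_nodup (agents : List String) (agent_zone : List (String × String)) :
    (pvByZone agents agent_zone).keys.Nodup := by
  rw [pvByZone_keys]; exact PySem.Set.nodup_ofList _

-- every value stored in the zone-adjacency dict is a Python set, hence duplicate-free

lemma pvZoneAdj_nodup_aux (l : List (String × String)) (d : PySem.Dict String (PySem.Set String))
    (hd : ∀ z, (d.getD z PySem.Set.empty).Nodup) (z : String) :
    ((l.foldl (fun d ab =>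
      (d.modify ab.1 PySem.Set.empty (fun s => s.add ab.2)).modify ab.2 PySem.Set.empty (fun s => s.add ab.1)) d).getD z PySem.Set.empty).Nodup := by
  induction l generalizing d with
  | nil => exact hd z
  | cons ab t ih =>
    refine ih _ ?_
    intro w
    simp only [PySem.Dict.getD_modify]
    split_ifs <;>
      first
        | exact hd _
        | exact PySem.Set.nodup_add _ _ (hd _)
        | exact PySem.Set.nodup_add _ _ (PySem.Set.nodup_add _ _ (hd _))

lemma pvZoneAdj_nodup (zone_adjacency : List (String × String)) (z : String) :
    ((pvZoneAdj zone_adjacency).getD z PySem.Set.empty).Nodup := by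
  unfold pvZoneAdj
  exact pvZoneAdj_nodup_aux _ _ (fun w => by simp [PySem.Dict.getD_empty, PySem.Set.empty]) z

-- count of x in one zone's group

lemma count_group (agents : List String) (agent_zone : List (String × String)) (zz x : String) :
    (agents.filter (fun a => (pvAz agent_zone).getD a "" == zz)).count x
      = if (pvAz agent_zone).getD x "" = zz then agents.count x else 0 := by
  split_ifs with h
  · exact List.count_filter (by simp [h])
  · rw [List.count_eq_zero]
    simp only [List.mem_filter, beq_iff_eq]
    rintro ⟨-, h2⟩; exact h h2

lemma sum_counts (S : List String) (hS : S.Nodup) (z w : String) (c : Nat) :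
    (S.map (fun zz => if zz ≠ z then (if w = zz then c else 0) else 0)).sum
      = if w ∈ S ∧ w ≠ z then c else 0 := by
  induction S with
  | nil => simp
  | cons hd t ih =>
    rw [List.nodup_cons] at hS
    rw [List.map_cons, List.sum_cons, ih hS.2]
    by_cases hw : w = hd
    · subst hw
      simp [hS.1]
    · simp [hw, List.mem_cons]

-- count of x in the gathered (pre-sort) pool of zone z

lemma count_gather (agents : List String) (agent_zone : List (String × String)) (zone_adjacency : List (String × String)) (z x : String) :
    (pvGather agents agent_zone zone_adjacency z ((pvByZone agents agent_zone).getD z [])).count x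
      = if (pvAz agent_zone).getD x "" = z ∨ (pvAz agent_zone).getD x "" ∈ (pvZoneAdj zone_adjacency).getD z PySem.Set.empty
        then agents.count x else 0 := by
  unfold pvGather
  have hbody : (fun (g : List String) zz => if zz ≠ z then g ++ (pvByZone agents agent_zone).getD zz [] else g)
      = (fun g zz => g ++ (if zz ≠ z then (pvByZone agents agent_zone).getD zz [] else [])) := by
    funext g zz; split_ifs <;> simp
  rw [hbody, PySem.List.foldl_append_eq_flatMap, List.count_append, List.count_flatMap]
  have hmap : (List.map (List.count x ∘ fun zz => if zz ≠ z then (pvByZone agents agent_zone).getD zz [] else [])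
        ((pvZoneAdj zone_adjacency).getD z PySem.Set.empty))
      = ((pvZoneAdj zone_adjacency).getD z PySem.Set.empty).map
          (fun zz => if zz ≠ z then (if (pvAz agent_zone).getD x "" = zz then agents.count x else 0) else 0) := by
    apply List.map_congr_left
    intro zz _
    simp only [Function.comp_apply]
    by_cases h1 : zz ≠ z
    · rw [if_pos h1, if_pos h1, pvByZone_getD, count_group]
    · simp [h1]
  rw [hmap, sum_counts _ (pvZoneAdj_nodup zone_adjacency z), pvByZone_getD, count_group]
  by_cases h1 : (pvAz agent_zone).getD x "" = z <;> simp [h1]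

-- generic: a fold inserting distinct keys, looked up at one of them

lemma foldl_insert_getD_not_mem {ν : Type} (F : String × ν → ν) (l : List (String × ν)) (d : PySem.Dict String ν) (z : String) (d0 : ν)
    (h : z ∉ l.map (·.1)) :
    (l.foldl (fun p zm => p.insert zm.1 (F zm)) d).getD z d0 = d.getD z d0 := by
  induction l generalizing d with
  | nil => rfl
  | cons hd t ih =>
    simp only [List.map_cons, List.mem_cons, not_or] at h
    rw [List.foldl_cons, ih _ h.2, PySem.Dict.getD_insert, if_neg h.1]

lemma foldl_insert_getD_mem {ν : Type} (F : String × ν → ν) (l : List (String × ν)) (d : PySem.Dict String ν) (z : String) (ms : ν) (d0 : ν)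
    (hnd : (l.map (·.1)).Nodup) (hmem : (z, ms) ∈ l) :
    (l.foldl (fun p zm => p.insert zm.1 (F zm)) d).getD z d0 = F (z, ms) := by
  induction l generalizing d with
  | nil => cases hmem
  | cons hd t ih =>
    rw [List.map_cons, List.nodup_cons] at hnd
    rcases List.mem_cons.1 hmem with h | h
    · subst h
      rw [List.foldl_cons, foldl_insert_getD_not_mem _ _ _ _ _ hnd.1, PySem.Dict.getD_insert, if_pos rfl]
    · rw [List.foldl_cons]; exact ih _ hnd.2 h

-- the pool entry of the zone of any listed agent

lemma pvPool_getD (agents : List String) (agent_zone : List (String × String)) (zone_adjacency : List (String × String)) (j : String)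
    (hj : j ∈ agents) :
    (pvPool agents agent_zone zone_adjacency).getD ((pvAz agent_zone).getD j "") []
      = PySem.List.sorted
          (pvGather agents agent_zone zone_adjacency ((pvAz agent_zone).getD j "")
            ((pvByZone agents agent_zone).getD ((pvAz agent_zone).getD j "") []))
          (fun x => x) false := by
  unfold pvPool
  set z := (pvAz agent_zone).getD j "" with hz
  have hkeys : z ∈ (pvByZone agents agent_zone).keys := by
    rw [pvByZone_keys]
    rw [PySem.Set.mem_ofList]
    exact List.mem_map.2 ⟨j, hj, rfl⟩
  have hitems : (z, (pvByZone agents agent_zone).getD z []) ∈ (pvByZone agents agent_zone).items := by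
    rw [PySem.Dict.items_eq_map_keys _ (pvByZone_keys_nodup agents agent_zone) []]
    exact List.mem_map.2 ⟨z, hkeys, rfl⟩
  have hnd : ((pvByZone agents agent_zone).items.map (·.1)).Nodup := by
    have : (pvByZone agents agent_zone).items.map (·.1) = (pvByZone agents agent_zone).keys := by
      simp [PySem.Dict.keys]
    rw [this]; exact pvByZone_keys_nodup agents agent_zone
  exact foldl_insert_getD_mem
    (fun zm => PySem.List.sorted (pvGather agents agent_zone zone_adjacency zm.1 zm.2) (fun x => x) false)
    _ _ _ _ _ hnd hitems

-- per-agent: A's sorted filtered scan equals B's self-filtered shared pool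

lemma value_eq (agents : List String) (agent_zone : List (String × String)) (zone_adjacency : List (String × String)) (j : String)
    (hj : j ∈ agents) :
    PySem.List.sorted
      (agents.filter (fun a => decide (a ≠ j) &&
        (PySem.Set.union (PySem.Set.ofList [(pvAz agent_zone).getD j ""])
          ((pvZoneAdj zone_adjacency).getD ((pvAz agent_zone).getD j "") PySem.Set.empty)).contains ((pvAz agent_zone).getD a "")))
      (fun x => x) false
    = ((pvPool agents agent_zone zone_adjacency).getD ((pvAz agent_zone).getD j "") []).filter (fun x => decide (x ≠ j)) := by
  rw [pvPool_getD agents agent_zone zone_adjacency j hj]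
  apply PySem.List.sorted_id_eq_of_perm_of_pairwise
  · rw [List.perm_iff_count]
    intro x
    by_cases hx : x = j
    · subst hx
      rw [List.count_eq_zero.2 (by simp [List.mem_filter]), List.count_eq_zero.2 (by simp [List.mem_filter])]
    · rw [List.count_filter (by simp [hx]),
        (PySem.List.sorted_perm _ _ _).count_eq,
        count_gather]
      by_cases hz : (pvAz agent_zone).getD x "" = (pvAz agent_zone).getD j ""
          ∨ (pvAz agent_zone).getD x "" ∈ (pvZoneAdj zone_adjacency).getD ((pvAz agent_zone).getD j "") PySem.Set.empty
      · rw [if_pos hz, eq_comm]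
        exact List.count_filter (by
          simp only [PySem.Set.contains_iff, PySem.Set.mem_union, PySem.Set.mem_ofList,
            List.mem_singleton, Bool.and_eq_true, decide_eq_true_eq]
          exact ⟨hx, hz⟩)
      · rw [if_neg hz, eq_comm, List.count_eq_zero]
        intro hmem
        rw [List.mem_filter] at hmem
        rw [Bool.and_eq_true] at hmem
        have hc := hmem.2.2
        have hc' := (PySem.Set.contains_iff _ _).1 hc
        rw [PySem.Set.mem_union, PySem.Set.mem_ofList, List.mem_singleton] at hc'
        exact hz hc'
  · exact List.Pairwise.sublist List.filter_sublist (PySem.List.sorted_pairwise _ _)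

-- ===== VERDICT (by name: the statement is the Claim_ definition above) =====
theorem build_neighbor_graph_py_spec : Claim_equal_build_neighbor_graph_py := by
  intro agents agent_zone zone_adjacency _
  unfold Spec_build_neighbor_graph_py build_neighbor_graph_py build_neighbor_graph_py_alt
  apply congrArg PySem.Dict.items
  apply PySem.List.foldl_congr_mem
  intro acc j hj
  dsimp only
  rw [value_eq agents agent_zone zone_adjacency j hj]
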